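-- pv_equiv track=rewrite | github.com/KKballoon/DeepLiterature | src/utils/common_utils.py | is_mobile
-- ===== SOURCE A (Python) =====
-- def is_mobile(user_agent):
--     # 定义移动设备检测函数
--     # 参数user_agent: HTTP请求中的User-Agent字符串
--     # 返回值: 布尔值，True表示移动设备，False表示桌面设备
--     # 用于根据设备类型调整界面显示
--
--     mobile_keywords = [
--         'Android', 'iPhone', 'iPad', 'Windows Phone', 'Mobile', 'Symbian',
--         'BlackBerry', 'Opera Mini', 'IEMobile', 'UCBrowser', 'MQQBrowser'
--     ]
--     # 定义移动设备的关键词列表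
--     # 包含主流移动操作系统和浏览器的标识符
--     # Android: 安卓系统
--     # iPhone/iPad: 苹果iOS设备
--     # Windows Phone: 微软移动系统
--     # Mobile: 通用移动设备标识
--     # Symbian: 诺基亚系统
--     # BlackBerry: 黑莓设备
--     # Opera Mini: 轻量级浏览器
--     # IEMobile: 微软移动浏览器
--     # UCBrowser/MQQBrowser: 中国常用移动浏览器
--
--     # 检查User-Agent中是否包含手机端的关键词
--     for keyword in mobile_keywords:
--         # 遍历所有移动设备关键词
--         if keyword.lower() in user_agent.lower():
--             # 进行不区分大小写的字符串包含检查
--             # lower()方法将字符串转换为小写，确保匹配的准确性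
--             return True
--             # 如果找到任何移动设备关键词，立即返回True
--
--     return False
-- ===== SOURCE B (Python) =====
-- _KEYS = ('android', 'iphone', 'ipad', 'windows phone', 'mobile', 'symbian',
--          'blackberry', 'opera mini', 'iemobile', 'ucbrowser', 'mqqbrowser')
--
--
-- def is_mobile(user_agent):
--     # lowercase once, then slide a cursor over the string, testing every
--     # keyword as a prefix of the remaining suffix at each position
--     ua = user_agent.lower()
--     i = 0
--     n = len(ua)
--     while i < n:
--         for k in _KEYS:
--             if ua.startswith(k, i):
--                 return True
--         i += 1
--     return False
-- ===== Notes on version B (the rewrite author's own statement) =====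
-- stated objective: alternative
-- what changed: B lowercases the string once and makes a single cursor sweep over it, testing each keyword as a prefix of the current suffix, instead of A's eleven separate containment passes that each re-lowercase both strings.
import Mathlib
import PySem

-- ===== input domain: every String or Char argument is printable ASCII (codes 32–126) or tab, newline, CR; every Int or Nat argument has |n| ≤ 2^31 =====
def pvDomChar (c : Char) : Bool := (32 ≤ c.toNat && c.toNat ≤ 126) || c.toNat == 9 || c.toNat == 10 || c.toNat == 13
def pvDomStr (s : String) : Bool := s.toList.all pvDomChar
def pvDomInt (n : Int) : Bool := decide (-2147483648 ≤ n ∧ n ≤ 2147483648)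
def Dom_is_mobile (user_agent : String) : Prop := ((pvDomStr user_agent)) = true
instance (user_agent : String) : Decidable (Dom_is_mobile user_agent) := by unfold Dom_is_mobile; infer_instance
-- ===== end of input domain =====

-- B lowercases once and makes a single cursor sweep over the string, testing each keyword as a
-- prefix of the current suffix, instead of A's eleven separate containment passes (objective:
-- alternative decomposition, same asymptotic cost).

-- ===== PORT A =====
def mobileKeywords : List String :=
  ["Android", "iPhone", "iPad", "Windows Phone", "Mobile", "Symbian",
   "BlackBerry", "Opera Mini", "IEMobile", "UCBrowser", "MQQBrowser"]

-- for keyword in mobile_keywords: if keyword.lower() in user_agent.lower(): return True / return False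
def is_mobile (user_agent : String) : Bool :=
  mobileKeywords.any (fun keyword =>
    PySem.Str.isIn (PySem.Str.lower keyword) (PySem.Str.lower user_agent))

-- ===== PORT B =====
def altKeys : List (List Char) :=
  ["android".toList, "iphone".toList, "ipad".toList, "windows phone".toList,
   "mobile".toList, "symbian".toList, "blackberry".toList, "opera mini".toList,
   "iemobile".toList, "ucbrowser".toList, "mqqbrowser".toList]

-- Source B's while-loop over the cursor i: 'ua.startswith(k, i)' with i in range is exactly a prefix
-- test on the suffix from i, so the cursor loop is structural recursion on that suffix (exact here).
def altScan : List Char → Bool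
  | [] => false
  | c :: rest =>
      if altKeys.any (fun k => PySem.Chars.startswith (c :: rest) k) then true
      else altScan rest

def is_mobile_alt (user_agent : String) : Bool :=
  altScan (PySem.Chars.lower user_agent.toList)

-- ===== PRECONDITION & SPEC =====
def Spec_is_mobile (user_agent : String) (out : Bool) : Prop := out = is_mobile_alt user_agent
instance (user_agent : String) (out : Bool) : Decidable (Spec_is_mobile user_agent out) := by unfold Spec_is_mobile; infer_instance

-- ===== CLAIM (what is proved, stated in full; the proofs are below) =====
def Claim_equal_is_mobile : Prop := ∀ (user_agent : String), Dom_is_mobile user_agent → Spec_is_mobile user_agent (is_mobile user_agent)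

-- ===== LEMMAS AND PROOFS =====

theorem altKeys_ne_nil : ∀ k ∈ altKeys, k ≠ [] := by decide

-- the cursor sweep succeeds iff some keyword is a prefix of some suffix
theorem altScan_iff (L : List Char) :
    altScan L = true ↔ ∃ k ∈ altKeys, ∃ i, k <+: L.drop i := by
  induction L with
  | nil =>
    simp only [altScan, List.drop_nil, List.prefix_nil]
    rw [Bool.false_eq_true, false_iff]
    rintro ⟨k, hk, _, rfl⟩
    exact altKeys_ne_nil [] hk rfl
  | cons c rest ih =>
    simp only [altScan]
    split_ifs with h
    · simp only [true_iff]
      rw [List.any_eq_true] at h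
      obtain ⟨k, hk, hs⟩ := h
      exact ⟨k, hk, 0, (PySem.Chars.startswith_iff _ _).mp hs⟩
    · rw [ih]
      constructor
      · rintro ⟨k, hk, i, hp⟩
        exact ⟨k, hk, i + 1, by simpa using hp⟩
      · rintro ⟨k, hk, i, hp⟩
        cases i with
        | zero =>
          exact absurd (List.any_eq_true.mpr
            ⟨k, hk, (PySem.Chars.startswith_iff _ _).mpr (by simpa using hp)⟩) h
        | succ j => exact ⟨k, hk, j, by simpa using hp⟩

-- lowering A's keyword list gives exactly B's list
theorem keys_lower :
    mobileKeywords.map (fun k => PySem.Chars.lower k.toList) = altKeys := by decide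

-- ===== VERDICT (by name: the statement is the Claim_ definition above) =====
theorem is_mobile_spec : Claim_equal_is_mobile := by
  intro ua _
  unfold Spec_is_mobile is_mobile is_mobile_alt
  set L := PySem.Chars.lower ua.toList with hL
  rw [Bool.eq_iff_iff, altScan_iff]
  simp only [PySem.Str.isIn_eq, PySem.Str.toList_lower, ← hL, List.any_eq_true]
  constructor
  · rintro ⟨keyword, hkw, hin⟩
    refine ⟨PySem.Chars.lower keyword.toList, ?_, ?_⟩
    · rw [← keys_lower]
      exact List.mem_map_of_mem hkw
    · obtain ⟨j, hj⟩ := (PySem.Chars.exists_prefix_drop_iff_isIn (s := L) (sub := PySem.Chars.lower keyword.toList)).mpr hin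
      exact ⟨j, hj⟩
  · rintro ⟨k, hk, i, hp⟩
    rw [← keys_lower, List.mem_map] at hk
    obtain ⟨keyword, hkw, rfl⟩ := hk
    exact ⟨keyword, hkw, (PySem.Chars.exists_prefix_drop_iff_isIn (s := L) (sub := PySem.Chars.lower keyword.toList)).mp ⟨i, hp⟩⟩
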